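-- pv_equiv track=rewrite | github.com/Binovizer/GeeksForGeeks-Python | arrays/wave_array.py | wave_array
-- ===== SOURCE A (Python) =====
-- def wave_array(arr):
--   arr.sort()
--   i = 0
--   while i < len(arr) - 1:
--     temp = arr[i]
--     arr[i] = arr[i+1]
--     arr[i+1] = temp
--     i += 2
--   return arr
-- ===== SOURCE B (Python) =====
-- def wave_array(arr):
--     arr.sort()
--     evens = arr[0::2]
--     odds = arr[1::2]
--     out = [v for pair in zip(odds, evens) for v in pair]
--     if len(arr) % 2 == 1:
--         out.append(arr[-1])
--     arr[:] = out
--     return arr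
-- ===== Notes on version B (the rewrite author's own statement) =====
-- stated objective: alternative
-- what changed: B replaces A's index-stepping in-place adjacent-swap pass by deinterleaving the sorted list into the even-position and odd-position slices and zip-interleaving them back in swapped order (appending the lone last element on odd lengths), assigning the result with arr[:] to keep the in-place mutation.
import Mathlib
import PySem

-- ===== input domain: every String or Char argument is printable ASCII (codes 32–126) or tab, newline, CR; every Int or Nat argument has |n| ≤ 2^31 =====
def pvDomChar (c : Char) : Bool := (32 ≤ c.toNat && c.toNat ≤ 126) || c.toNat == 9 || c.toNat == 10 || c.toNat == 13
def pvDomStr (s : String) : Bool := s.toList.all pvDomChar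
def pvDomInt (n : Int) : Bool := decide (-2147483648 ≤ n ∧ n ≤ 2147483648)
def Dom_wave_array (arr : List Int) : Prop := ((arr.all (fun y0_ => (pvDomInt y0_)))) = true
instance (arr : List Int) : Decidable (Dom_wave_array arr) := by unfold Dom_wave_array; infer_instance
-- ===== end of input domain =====

-- B replaces A's index-stepping in-place adjacent-swap pass by deinterleaving the sorted
-- list into its even-position and odd-position slices and zip-interleaving them back in
-- swapped order (objective: alternative, same cost). Both A and B mutate the caller's
-- list in place in Python; the equivalence proved here is about the RETURN value.

-- ===== PORT A =====
-- the while loop: swap arr[i] and arr[i+1], step i by 2, while i < len(arr) - 1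
def waveSwapLoop (arr : List Int) (i : Nat) : List Int :=
  if i < arr.length - 1 then
    let temp := arr.getD i 0
    let arr' := (arr.set i (arr.getD (i+1) 0)).set (i+1) temp
    waveSwapLoop arr' (i+2)
  else arr
termination_by arr.length - i
decreasing_by simp; omega

def wave_array (arr : List Int) : List Int :=
  waveSwapLoop (PySem.List.sorted arr (fun x => x) false) 0

-- ===== PORT B =====
-- xs[0::2] / xs[1::2]: extended slices with step 2 are not in PySem; ported by hand,
-- exact: everyOther xs = xs[0::2], so xs[1::2] = everyOther xs.tail.
def everyOther : List Int → List Int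
  | [] => []
  | [a] => [a]
  | a :: _ :: rest => a :: everyOther rest

def wave_array_alt (arr : List Int) : List Int :=
  let s := PySem.List.sorted arr (fun x => x) false
  let evens := everyOther s
  let odds := everyOther s.tail
  let out := (odds.zip evens).flatMap (fun p => [p.1, p.2])
  -- arr[-1]: only evaluated when len % 2 == 1, so the list is nonempty (getLast!)
  if s.length % 2 = 1 then out ++ [s.getLast!] else out

-- ===== PRECONDITION & SPEC =====
def Spec_wave_array (arr : List Int) (out : List Int) : Prop := out = wave_array_alt arr
instance (arr : List Int) (out : List Int) : Decidable (Spec_wave_array arr out) := by unfold Spec_wave_array; infer_instance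

-- ===== CLAIM =====
def Claim_equal_wave_array : Prop := ∀ (arr : List Int), Dom_wave_array arr → Spec_wave_array arr (wave_array arr)

-- ===== LEMMAS AND PROOFS =====
-- proof-side characterisation of both ports: pairwise swap of adjacent elements
def pairSwap : List Int → List Int
  | a :: b :: rest => b :: a :: pairSwap rest
  | xs => xs

theorem waveSwapLoop_append (rest pre : List Int) :
    waveSwapLoop (pre ++ rest) pre.length = pre ++ pairSwap rest := by
  match rest with
  | [] => rw [waveSwapLoop]; simp [pairSwap]
  | [a] =>
    rw [waveSwapLoop]
    have : ¬ pre.length < (pre ++ [a]).length - 1 := by simp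
    simp only [this, if_false, pairSwap]
  | a :: b :: rest =>
    rw [waveSwapLoop]
    have hlt : pre.length < (pre ++ a :: b :: rest).length - 1 := by simp
    simp only [hlt, if_true]
    have hget1 : (pre ++ a :: b :: rest).getD pre.length 0 = a := by
      simp [List.getD]
    have hget2 : (pre ++ a :: b :: rest).getD (pre.length + 1) 0 = b := by
      have h : pre.length + 1 - pre.length = 1 := by omega
      simp [List.getD, h]
    have hset : ((pre ++ a :: b :: rest).set pre.length b).set (pre.length + 1) a
        = (pre ++ [b, a]) ++ rest := by
      have h1 : (pre ++ a :: b :: rest).set pre.length b = pre ++ b :: b :: rest := by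
        rw [List.set_append_right _ _ (Nat.le_refl _)]
        simp
      rw [h1, show pre.length + 1 = (pre ++ [b]).length by simp,
          show pre ++ b :: b :: rest = (pre ++ [b]) ++ b :: rest by simp]
      rw [List.set_append_right _ _ (Nat.le_refl _)]
      simp
    rw [hget1, hget2, hset]
    have h2 : pre.length + 2 = (pre ++ [b, a]).length := by simp
    rw [h2, waveSwapLoop_append rest (pre ++ [b, a])]
    simp [pairSwap]
termination_by rest.length

theorem interleave_eq_pairSwap (s : List Int) :
    (if s.length % 2 = 1 then
        ((everyOther s.tail).zip (everyOther s)).flatMap (fun p => [p.1, p.2]) ++ [s.getLast!]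
      else ((everyOther s.tail).zip (everyOther s)).flatMap (fun p => [p.1, p.2]))
    = pairSwap s := by
  match s with
  | [] => simp [everyOther, pairSwap]
  | [a] => simp [everyOther, pairSwap, List.getLast!]
  | a :: b :: rest =>
    have ih := interleave_eq_pairSwap rest
    have hlen : (a :: b :: rest).length % 2 = rest.length % 2 := by simp; omega
    have hev : everyOther (a :: b :: rest) = a :: everyOther rest := rfl
    have hod : everyOther (a :: b :: rest).tail = b :: everyOther rest.tail := by
      cases rest <;> rfl
    rw [hev, hod, hlen]
    simp only [List.zip_cons_cons, List.flatMap_cons]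
    by_cases h : rest.length % 2 = 1
    · have hne : rest ≠ [] := by intro he; rw [he] at h; simp at h
      have hlast : (a :: b :: rest).getLast! = rest.getLast! := by
        cases rest with
        | nil => exact absurd rfl hne
        | cons c t => simp [List.getLast!, List.getLast]
      rw [h, if_pos rfl] at ih ⊢
      rw [hlast]
      simp only [pairSwap]
      rw [← ih]
      simp
    · rw [if_neg h] at ih ⊢
      simp only [pairSwap]
      rw [← ih]
      simp
termination_by s.length

-- ===== VERDICT =====
theorem wave_array_spec : Claim_equal_wave_array := by
  intro arr _
  unfold Spec_wave_array wave_array wave_array_alt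
  rw [show (0 : Nat) = ([] : List Int).length from rfl,
      show PySem.List.sorted arr (fun x => x) false
        = [] ++ PySem.List.sorted arr (fun x => x) false from rfl]
  rw [waveSwapLoop_append]
  simp only [List.nil_append]
  rw [← interleave_eq_pairSwap]
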